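-- pv_equiv track=rewrite | github.com/YuanzhiHe/BFDP | core_code/scripts/analyze_calvin_orientation_wrap_effect.py | _extract_angle_index_sets
-- ===== SOURCE A (Python) =====
-- ANGLE_COMPONENTS = {"roll", "pitch", "yaw"}
--
-- def _extract_angle_index_sets(semantics_payload: dict) -> tuple[set[int], set[int], set[int]]:
--     angle_indices: set[int] = set()
--     yaw_indices: set[int] = set()
--     roll_pitch_indices: set[int] = set()
--     for item in semantics_payload.get("scene_obs_labels", []):
--         if item.get("group") != "movable_object":
--             continue
--         component = item.get("component")
--         scene_idx = int(item["scene_index"])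
--         selected_idx = 9 + scene_idx
--         if component in ANGLE_COMPONENTS:
--             angle_indices.add(selected_idx)
--         if component == "yaw":
--             yaw_indices.add(selected_idx)
--         if component in {"roll", "pitch"}:
--             roll_pitch_indices.add(selected_idx)
--     return angle_indices, yaw_indices, roll_pitch_indices
-- ===== SOURCE B (Python) =====
-- ANGLE_COMPONENTS = {"roll", "pitch", "yaw"}
--
-- def _extract_angle_index_sets(semantics_payload: dict) -> tuple[set[int], set[int], set[int]]:
--     pairs = [
--         (item.get("component"), 9 + int(item["scene_index"]))
--         for item in semantics_payload.get("scene_obs_labels", [])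
--         if item.get("group") == "movable_object"
--     ]
--     yaw_indices = {idx for comp, idx in pairs if comp == "yaw"}
--     roll_pitch_indices = {idx for comp, idx in pairs if comp in {"roll", "pitch"}}
--     angle_indices = {idx for comp, idx in pairs if comp in ANGLE_COMPONENTS}
--     return angle_indices, yaw_indices, roll_pitch_indices
-- ===== Notes on version B (the rewrite author's own statement) =====
-- stated objective: simpler
-- what changed: Replaces the single stateful loop with three mutable set accumulators by a filter-and-map pass building (component, index) pairs followed by three independent set comprehensions over that pair list.
import Mathlib
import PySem

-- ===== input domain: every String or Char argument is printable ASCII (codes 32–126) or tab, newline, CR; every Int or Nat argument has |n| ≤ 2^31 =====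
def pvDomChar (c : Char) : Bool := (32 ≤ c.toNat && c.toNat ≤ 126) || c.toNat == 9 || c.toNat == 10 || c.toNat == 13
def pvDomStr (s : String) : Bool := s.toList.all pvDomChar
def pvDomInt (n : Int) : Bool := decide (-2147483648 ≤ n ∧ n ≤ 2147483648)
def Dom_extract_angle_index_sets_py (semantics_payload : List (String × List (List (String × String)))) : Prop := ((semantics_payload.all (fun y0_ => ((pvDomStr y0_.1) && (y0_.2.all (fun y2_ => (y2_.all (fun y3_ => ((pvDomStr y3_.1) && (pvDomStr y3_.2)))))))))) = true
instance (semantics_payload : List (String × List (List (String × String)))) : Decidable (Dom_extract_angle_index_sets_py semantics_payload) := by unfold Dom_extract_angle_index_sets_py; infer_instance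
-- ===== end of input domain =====

-- B replaces A's single stateful loop (three mutable set accumulators) by one filter-and-map pass
-- building (component, index) pairs followed by three independent set comprehensions: simpler.

-- ===== PORT A =====
-- one iteration of A's for-loop over the three accumulator sets
def pvStepA (st : PySem.Set Int × PySem.Set Int × PySem.Set Int) (item : List (String × String)) :
    PySem.Set Int × PySem.Set Int × PySem.Set Int :=
  if (PySem.Dict.mk item).get? "group" ≠ some "movable_object" then st
  else
    let component := (PySem.Dict.mk item).get? "component"
    -- int(item["scene_index"]): total form (getD) — exact under Pre_ (key present, string int-like)
    let scene_idx := (PySem.Int.ofStr? ((PySem.Dict.mk item).getD "scene_index" "")).getD 0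
    let selected_idx := 9 + scene_idx
    let angle := if component == some "roll" || component == some "pitch" || component == some "yaw"
                 then PySem.Set.add st.1 selected_idx else st.1
    let yaw := if component == some "yaw" then PySem.Set.add st.2.1 selected_idx else st.2.1
    let rp := if component == some "roll" || component == some "pitch"
              then PySem.Set.add st.2.2 selected_idx else st.2.2
    (angle, yaw, rp)

def extract_angle_index_sets_py (semantics_payload : List (String × List (List (String × String)))) : List Int × List Int × List Int :=
  ((PySem.Dict.mk semantics_payload).getD "scene_obs_labels" []).foldl pvStepA ([], [], [])

-- ===== PORT B =====
-- the pair (item.get("component"), 9 + int(item["scene_index"])) of B's comprehension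
def pvPairB (item : List (String × String)) : Option String × Int :=
  ((PySem.Dict.mk item).get? "component",
   9 + (PySem.Int.ofStr? ((PySem.Dict.mk item).getD "scene_index" "")).getD 0)

def extract_angle_index_sets_py_alt (semantics_payload : List (String × List (List (String × String)))) : List Int × List Int × List Int :=
  let pairs := (((PySem.Dict.mk semantics_payload).getD "scene_obs_labels" []).filter
      (fun item => (PySem.Dict.mk item).get? "group" == some "movable_object")).map pvPairB
  let yaw := PySem.Set.ofList ((pairs.filter (fun p => p.1 == some "yaw")).map Prod.snd)
  let rp := PySem.Set.ofList ((pairs.filter (fun p => p.1 == some "roll" || p.1 == some "pitch")).map Prod.snd)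
  let angle := PySem.Set.ofList ((pairs.filter (fun p => p.1 == some "roll" || p.1 == some "pitch" || p.1 == some "yaw")).map Prod.snd)
  (angle, yaw, rp)

-- ===== PRECONDITION & SPEC =====
-- Pre_ excludes exactly the inputs where Python A raises: a movable_object label whose
-- "scene_index" key is missing (KeyError) or whose value int() rejects (ValueError).
def Pre_extract_angle_index_sets_py (semantics_payload : List (String × List (List (String × String)))) : Prop :=
  ∀ item ∈ (PySem.Dict.mk semantics_payload).getD "scene_obs_labels" [],
    (PySem.Dict.mk item).get? "group" = some "movable_object" →
    (((PySem.Dict.mk item).get? "scene_index").bind PySem.Int.ofStr?).isSome = true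
instance (semantics_payload : List (String × List (List (String × String)))) : Decidable (Pre_extract_angle_index_sets_py semantics_payload) := by unfold Pre_extract_angle_index_sets_py; infer_instance

def pvWitness_extract_angle_index_sets_py : (List (String × List (List (String × String)))) :=
  [("scene_obs_labels", [[("group", "movable_object"), ("component", "yaw"), ("scene_index", "3")]])]

def Spec_extract_angle_index_sets_py (semantics_payload : List (String × List (List (String × String)))) (out : List Int × List Int × List Int) : Prop := out = extract_angle_index_sets_py_alt semantics_payload
instance (semantics_payload : List (String × List (List (String × String)))) (out : List Int × List Int × List Int) : Decidable (Spec_extract_angle_index_sets_py semantics_payload out) := by unfold Spec_extract_angle_index_sets_py; infer_instance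

-- ===== CLAIM (what is proved, stated in full; the proofs are below) =====
def Claim_equal_extract_angle_index_sets_py : Prop := ∀ (semantics_payload : List (String × List (List (String × String)))), Dom_extract_angle_index_sets_py semantics_payload → Pre_extract_angle_index_sets_py semantics_payload → Spec_extract_angle_index_sets_py semantics_payload (extract_angle_index_sets_py semantics_payload)

-- ===== LEMMAS AND PROOFS =====

-- a conditional-add fold is the add-fold over the filtered, mapped list
theorem pv_foldl_add_if {α : Type} (p : α → Bool) (f : α → Int) :
    ∀ (l : List α) (a : PySem.Set Int),
      l.foldl (fun s it => if p it then PySem.Set.add s (f it) else s) a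
        = (((l.filter p).map f).foldl PySem.Set.add a) := by
  intro l
  induction l with
  | nil => intro a; rfl
  | cons x xs ih =>
    intro a
    by_cases h : p x = true <;> simp [h, ih]

-- A's loop splits into three independent conditional-add folds over the movable_object items
theorem pv_stepA_split :
    ∀ (l : List (List (String × String))) (a y r : PySem.Set Int),
      l.foldl pvStepA (a, y, r)
        = ((l.filter (fun item => (PySem.Dict.mk item).get? "group" == some "movable_object")).foldl
             (fun s it => if (pvPairB it).1 == some "roll" || (pvPairB it).1 == some "pitch" || (pvPairB it).1 == some "yaw"
                          then PySem.Set.add s (pvPairB it).2 else s) a,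
           (l.filter (fun item => (PySem.Dict.mk item).get? "group" == some "movable_object")).foldl
             (fun s it => if (pvPairB it).1 == some "yaw" then PySem.Set.add s (pvPairB it).2 else s) y,
           (l.filter (fun item => (PySem.Dict.mk item).get? "group" == some "movable_object")).foldl
             (fun s it => if (pvPairB it).1 == some "roll" || (pvPairB it).1 == some "pitch"
                          then PySem.Set.add s (pvPairB it).2 else s) r) := by
  intro l
  induction l with
  | nil => intro a y r; rfl
  | cons x xs ih =>
    intro a y r
    by_cases h : (PySem.Dict.mk x).get? "group" = some "movable_object"
    · have hb : ((PySem.Dict.mk x).get? "group" == some "movable_object") = true := by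
        simp [h]
      simp only [List.foldl_cons, List.filter_cons, pvStepA, ne_eq, h,
        not_true_eq_false, if_false]
      rw [ih]
      simp [pvPairB]
    · have hb : ((PySem.Dict.mk x).get? "group" == some "movable_object") = false := by
        simp [h]
      simp only [List.foldl_cons, List.filter_cons, hb, pvStepA, ne_eq, h, not_false_eq_true, if_true,
        Bool.false_eq_true, if_false]
      rw [ih]

theorem extract_angle_index_sets_py_spec : Claim_equal_extract_angle_index_sets_py := by
  intro sp _ _
  unfold Spec_extract_angle_index_sets_py extract_angle_index_sets_py extract_angle_index_sets_py_alt
  rw [pv_stepA_split]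
  simp only [PySem.Set.ofList_eq_foldl]
  rw [pv_foldl_add_if, pv_foldl_add_if, pv_foldl_add_if]
  simp [List.filter_map, Function.comp_def, List.map_map]
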